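-- pv_equiv track=rewrite | github.com/jackinf/aoc | 2022/day07/main.py | calculate_folder_sizes
-- ===== SOURCE A (Python) =====
-- from collections import defaultdict
--
-- def calculate_folder_sizes(disk):
--     files_only = {k:v for k,v in disk.items() if k[-1] != "/"}
--
--     folder_sizes = defaultdict(int)
--     for filename, filesize in files_only.items():
--         path = filename.split('/')[1:]
--         while path:
--             path.pop()
--             fullpath = '/'.join(path)
--             folder_sizes[fullpath] += filesize
--
--     return folder_sizes
-- ===== SOURCE B (Python) =====
-- from collections import defaultdict
--
-- def calculate_folder_sizes(disk):
--     sizes = defaultdict(int)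
--     for filename, filesize in disk.items():
--         if filename[-1] == '/':
--             continue
--         parts = filename.split('/')
--         if len(parts) < 2:
--             continue
--         cur, ancestors = None, ['']
--         for part in parts[1:-1]:
--             cur = part if cur is None else cur + '/' + part
--             ancestors.append(cur)
--         for anc in reversed(ancestors):
--             sizes[anc] += filesize
--     return sizes
-- ===== Notes on version B (the rewrite author's own statement) =====
-- stated objective: alternative
-- what changed: B makes a single pass over the entries (no separate files-only dict) and builds each ancestor path incrementally from the previous one, emitting them in reverse, instead of A's re-splitting plus pop-and-full-rejoin of the path at every ancestor level.
import Mathlib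
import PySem

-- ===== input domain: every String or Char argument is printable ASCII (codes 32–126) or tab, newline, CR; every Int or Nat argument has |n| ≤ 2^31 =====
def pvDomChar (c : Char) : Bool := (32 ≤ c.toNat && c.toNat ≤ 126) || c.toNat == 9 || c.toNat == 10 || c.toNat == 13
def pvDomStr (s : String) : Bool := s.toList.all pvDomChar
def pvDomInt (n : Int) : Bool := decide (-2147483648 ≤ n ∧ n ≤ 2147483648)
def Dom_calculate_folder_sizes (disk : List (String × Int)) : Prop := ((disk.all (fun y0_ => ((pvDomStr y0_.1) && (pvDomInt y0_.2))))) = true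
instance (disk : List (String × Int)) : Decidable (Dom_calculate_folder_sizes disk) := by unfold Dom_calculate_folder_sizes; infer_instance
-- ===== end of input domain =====

-- B replaces A's per-level pop-and-rejoin of the path (and its separate filtering pass) by a single
-- pass that builds each ancestor path incrementally from the previous one and emits them in reverse;
-- objective: alternative (it does strictly less string work per ancestor level).

-- ===== PORT A =====
-- while path: path.pop(); fullpath = '/'.join(path); folder_sizes[fullpath] += filesize
def pvWhileA (v : Int) (d : PySem.Dict String Int) (path : List String) : PySem.Dict String Int :=
  if h : path = [] then d
  else
    let path' := path.dropLast
    let fullpath := PySem.Str.join "/" path'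
    pvWhileA v (d.modify fullpath 0 (· + v)) path'
termination_by path.length
decreasing_by
  simp only [List.length_dropLast]
  have := List.length_pos_of_ne_nil h
  omega

def calculate_folder_sizes (disk : List (String × Int)) : List (String × Int) :=
  -- files_only = {k: v for k, v in disk.items() if k[-1] != "/"}
  let files_only := PySem.Dict.ofList
    (((PySem.Dict.ofList disk).items).filter (fun kv => PySem.Str.pyGet? kv.1 (-1) != some '/'))
  -- for filename, filesize in files_only.items(): path = filename.split('/')[1:]; while …
  let folder_sizes := files_only.items.foldl
    (fun d kv =>
      pvWhileA kv.2 d (PySem.List.slice ((PySem.Str.split? kv.1 "/").getD []) (some 1) none))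
    PySem.Dict.empty
  folder_sizes.items

-- ===== PORT B =====
-- cur = part if cur is None else cur + '/' + part; ancestors.append(cur)
def pvAncStep (st : Option String × List String) (part : String) : Option String × List String :=
  let cur := match st.1 with
    | none => part
    | some c => c ++ "/" ++ part
  (some cur, st.2 ++ [cur])

def pvStepB (sizes : PySem.Dict String Int) (kv : String × Int) : PySem.Dict String Int :=
  if PySem.Str.pyGet? kv.1 (-1) == some '/' then sizes
  else
    let parts := (PySem.Str.split? kv.1 "/").getD []
    if parts.length < 2 then sizes
    else
      let st := (PySem.List.slice parts (some 1) (some (-1))).foldl pvAncStep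
        ((none : Option String), [""])
      st.2.reverse.foldl (fun dd anc => dd.modify anc 0 (· + kv.2)) sizes

def calculate_folder_sizes_alt (disk : List (String × Int)) : List (String × Int) :=
  ((PySem.Dict.ofList disk).items.foldl pvStepB PySem.Dict.empty).items

-- ===== PRECONDITION & SPEC =====
-- Pre_ excludes exactly the inputs on which Python A raises: for a zero-length key, indexing its last character raises IndexError (B raises there too).
def Pre_calculate_folder_sizes (disk : List (String × Int)) : Prop :=
  "" ∉ disk.map Prod.fst
instance (disk : List (String × Int)) : Decidable (Pre_calculate_folder_sizes disk) := by
  unfold Pre_calculate_folder_sizes; infer_instance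

def pvWitness_calculate_folder_sizes : (List (String × Int)) :=
  [("/a/b/c.txt", 100), ("/a/", 7), ("/a/d.txt", 1)]

def Spec_calculate_folder_sizes (disk : List (String × Int)) (out : List (String × Int)) : Prop :=
  out = calculate_folder_sizes_alt disk
instance (disk : List (String × Int)) (out : List (String × Int)) :
    Decidable (Spec_calculate_folder_sizes disk out) := by
  unfold Spec_calculate_folder_sizes; infer_instance

-- ===== CLAIM (what is proved, stated in full; the proofs are below) =====
def Claim_equal_calculate_folder_sizes : Prop := ∀ (disk : List (String × Int)),
  Dom_calculate_folder_sizes disk → Pre_calculate_folder_sizes disk →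
  Spec_calculate_folder_sizes disk (calculate_folder_sizes disk)

-- ===== LEMMAS AND PROOFS =====

-- string-level facts
theorem pv_join_singleton (x : String) : PySem.Str.join "/" [x] = x := by
  simp [PySem.Str.join, PySem.Chars.join, List.intercalate]

theorem pv_interc_append (s x : List Char) (pre : List (List Char)) (h : pre ≠ []) :
    List.intercalate s (pre ++ [x]) = List.intercalate s pre ++ s ++ x := by
  induction pre with
  | nil => simp at h
  | cons a t ih =>
    cases t with
    | nil => simp [List.intercalate]
    | cons b t' =>
      have := ih (by simp)
      simp [List.intercalate] at this ⊢
      simp [this]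

theorem pv_join_append (pre : List String) (x : String) (h : pre ≠ []) :
    PySem.Str.join "/" (pre ++ [x]) = PySem.Str.join "/" pre ++ "/" ++ x := by
  have h2 : pre.map String.toList ≠ [] := by simpa using h
  apply String.toList_injective
  simp [PySem.Str.join, PySem.Chars.join, String.toList_append,
    pv_interc_append _ _ _ h2]

theorem pv_slice_one_none {α : Type} (xs : List α) :
    PySem.List.slice xs (some 1) none = xs.drop 1 := by
  cases xs with
  | nil => rfl
  | cons a t =>
    simp [PySem.List.slice, PySem.List.clampIdx]

theorem pv_slice_one_neg_one {α : Type} (xs : List α) :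
    PySem.List.slice xs (some 1) (some (-1)) = (xs.drop 1).dropLast := by
  cases xs with
  | nil => rfl
  | cons a t =>
    simp [PySem.List.slice, PySem.List.clampIdx, List.dropLast_eq_take]
    split <;> omega

-- A's while loop as a fold over the ancestor list, deepest first
theorem pv_whileA_eq (v : Int) (path : List String) (d : PySem.Dict String Int) :
    pvWhileA v d path =
      ((List.range path.length).reverse.map
        (fun j => PySem.Str.join "/" (path.take j))).foldl
        (fun dd f => dd.modify f 0 (· + v)) d := by
  induction path using List.reverseRecOn generalizing d with
  | nil => rw [pvWhileA]; simp
  | append_singleton xs x ih =>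
    rw [pvWhileA, dif_neg (by simp)]
    simp only [List.dropLast_concat]
    rw [ih]
    rw [List.length_append, List.length_singleton, List.range_succ, List.reverse_append]
    simp only [List.reverse_singleton, List.singleton_append, List.map_cons, List.foldl_cons,
      List.take_left]
    refine congrArg _ (List.map_congr_left fun j hj => ?_)
    rw [List.take_append_of_le_length
      (le_of_lt (List.mem_range.mp (List.mem_reverse.mp hj)))]

-- invariant of B's incremental ancestor loop
def pvOptJ (pre : List String) : Option String :=
  if pre = [] then none else some (PySem.Str.join "/" pre)

def pvAccF (pre : List String) : List String :=
  "" :: (List.range pre.length).map (fun j => PySem.Str.join "/" (pre.take (j + 1)))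

theorem pv_ancLoop_eq (ys pre : List String) :
    ys.foldl pvAncStep (pvOptJ pre, pvAccF pre) = (pvOptJ (pre ++ ys), pvAccF (pre ++ ys)) := by
  induction ys generalizing pre with
  | nil => simp
  | cons part rest ih =>
    have hstep : pvAncStep (pvOptJ pre, pvAccF pre) part
        = (pvOptJ (pre ++ [part]), pvAccF (pre ++ [part])) := by
      have hcur : (match pvOptJ pre with
          | none => part
          | some c => c ++ "/" ++ part) = PySem.Str.join "/" (pre ++ [part]) := by
        by_cases hp : pre = []
        · subst hp; simp [pvOptJ, pv_join_singleton]
        · simp only [pvOptJ, if_neg hp]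
          rw [pv_join_append pre part hp]
      have hacc : pvAccF pre ++ [PySem.Str.join "/" (pre ++ [part])] = pvAccF (pre ++ [part]) := by
        unfold pvAccF
        have hmap : (List.range pre.length).map
              (fun j => PySem.Str.join "/" ((pre ++ [part]).take (j + 1)))
            = (List.range pre.length).map (fun j => PySem.Str.join "/" (pre.take (j + 1))) :=
          List.map_congr_left (fun j hj => by
            rw [List.take_append_of_le_length (by simpa using List.mem_range.mp hj)])
        rw [List.length_append, List.length_singleton, List.range_succ, List.map_append, hmap,
          List.map_singleton, List.take_of_length_le (by simp)]
        simp
      simp only [pvAncStep, hcur]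
      refine Prod.ext ?_ hacc
      simp [pvOptJ]
    rw [List.foldl_cons, hstep, ih (pre ++ [part])]
    simp [List.append_assoc]

-- A's deepest-first ancestor list is B's ancestor accumulator
theorem pv_range_map_eq (path : List String) (h : path ≠ []) :
    (List.range path.length).map (fun j => PySem.Str.join "/" (path.take j))
      = pvAccF path.dropLast := by
  have hl := List.length_pos_of_ne_nil h
  have hn : path.length = path.dropLast.length + 1 := by
    simp only [List.length_dropLast]; omega
  rw [hn, List.range_succ_eq_map]
  unfold pvAccF
  simp only [List.map_cons, List.map_map, List.take_zero]
  congr 1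
  apply List.map_congr_left
  intro j hj
  have hj' := List.mem_range.mp hj
  simp only [List.length_dropLast] at hj'
  simp only [Function.comp_apply]
  congr 1
  rw [List.dropLast_eq_take, List.take_take]
  congr 1
  omega

-- per-entry agreement between A's filtered step and B's inline step
theorem pv_elem_eq (d : PySem.Dict String Int) (kv : String × Int) :
    (if (PySem.Str.pyGet? kv.1 (-1) != some '/') = true
     then pvWhileA kv.2 d (PySem.List.slice ((PySem.Str.split? kv.1 "/").getD []) (some 1) none)
     else d) = pvStepB d kv := by
  obtain ⟨k, v⟩ := kv
  unfold pvStepB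
  by_cases he : (PySem.Str.pyGet? k (-1) == some '/') = true
  · simp only [bne, he, Bool.not_true, Bool.false_eq_true, if_false, if_true]
  · rw [Bool.not_eq_true] at he
    simp only [bne, he, Bool.not_false, if_true, Bool.false_eq_true, if_false]
    rw [pv_slice_one_none, pv_slice_one_neg_one]
    by_cases hlen : ((PySem.Str.split? k "/").getD []).length < 2
    · rw [if_pos hlen]
      have hd : ((PySem.Str.split? k "/").getD []).drop 1 = [] :=
        List.drop_eq_nil_iff.mpr (by omega)
      rw [hd, pvWhileA]
      simp
    · rw [if_neg hlen]
      rw [Nat.not_lt] at hlen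
      rw [pv_whileA_eq]
      have h0 : ((none : Option String), ([""] : List String)) = (pvOptJ [], pvAccF []) := by
        simp [pvOptJ, pvAccF]
      rw [h0, pv_ancLoop_eq]
      have hpn : ((PySem.Str.split? k "/").getD []).drop 1 ≠ [] := by
        intro hc
        rw [List.drop_eq_nil_iff] at hc
        omega
      rw [List.map_reverse, pv_range_map_eq _ hpn]
      simp [List.foldl_reverse]

-- a dict built from an association list with distinct keys has exactly that items list
theorem pv_items_ofList {κ ν : Type} [BEq κ] [LawfulBEq κ] (l : List (κ × ν))
    (h : (l.map Prod.fst).Nodup) : (PySem.Dict.ofList l).items = l := by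
  unfold PySem.Dict.ofList PySem.Dict.update
  rw [PySem.Dict.items_foldl_insert_fresh l Prod.fst Prod.snd PySem.Dict.empty
    (fun a _ => PySem.Dict.contains_empty _) h]
  simp [PySem.Dict.empty]

-- ===== VERDICT (by name: the statement is the Claim_ definition above) =====
theorem calculate_folder_sizes_spec : Claim_equal_calculate_folder_sizes := by
  intro disk _ _
  unfold Spec_calculate_folder_sizes calculate_folder_sizes calculate_folder_sizes_alt
  have hnd : ((((PySem.Dict.ofList disk).items).filter
      (fun kv => PySem.Str.pyGet? kv.1 (-1) != some '/')).map Prod.fst).Nodup := by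
    have h1 : (((PySem.Dict.ofList disk).items).map Prod.fst).Nodup := by
      have h2 := PySem.Dict.nodup_keys_ofList (κ := String) (ν := Int) disk
      simpa [PySem.Dict.keys] using h2
    exact h1.sublist (List.Sublist.map Prod.fst List.filter_sublist)
  simp only [pv_items_ofList _ hnd, List.foldl_filter]
  have hfun : (fun (x : PySem.Dict String Int) (y : String × Int) =>
      if (PySem.Str.pyGet? y.1 (-1) != some '/') = true
      then pvWhileA y.2 x (PySem.List.slice ((PySem.Str.split? y.1 "/").getD []) (some 1) none)
      else x) = pvStepB := by
    funext x y
    exact pv_elem_eq x y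
  rw [hfun]
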